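-- pv_equiv track=rewrite | github.com/PIA-Group/epibox | epibox/scientisst/scientisst.py | __checkCRC4
-- ===== SOURCE A (Python) =====
-- def __checkCRC4(data, length):
--     CRC4tab = [0, 3, 6, 5, 12, 15, 10, 9, 11, 8, 13, 14, 7, 4, 1, 2]
--     crc = 0
--     for i in range(length - 1):
--         b = data[i]
--         crc = CRC4tab[crc] ^ (b >> 4)
--         crc = CRC4tab[crc] ^ (b & 0x0F)
--
--     # CRC for last byte
--     crc = CRC4tab[crc] ^ (data[-1] >> 4)
--     crc = CRC4tab[crc]
--
--     return crc == (data[ - 1] & 0x0F)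
-- ===== SOURCE B (Python) =====
-- def __checkCRC4(data, length):
--     # Staged alternative: flatten the message into an explicit bit list
--     # (each byte MSB-first, then the last byte's high nibble, then four
--     # zero bits) and long-divide it bit-serially by x^4 + x + 1 (0x13);
--     # the remainder must equal the low nibble of the last byte.
--     bits = []
--     for i in range(length - 1):
--         b = data[i] & 0xFF
--         bits.extend((b >> k) & 1 for k in range(7, -1, -1))
--     hi = (data[-1] & 0xFF) >> 4
--     bits.extend((hi >> k) & 1 for k in range(3, -1, -1))
--     bits.extend([0, 0, 0, 0])
--     crc = 0
--     for bit in bits: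
--         crc = (crc << 1) | bit
--         if crc & 0x10:
--             crc ^= 0x13
--     return crc == (data[-1] & 0x0F)
-- ===== Notes on version B (the rewrite author's own statement) =====
-- stated objective: alternative
-- what changed: B drops A's 16-entry CRC4 lookup table and nibble pass entirely: it first flattens the message (masked bytes, then the last byte's high nibble, then four zero bits) into an explicit bit list, then long-divides that bit stream bit-serially by the polynomial x^4+x+1 (0x13).
import Mathlib
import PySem

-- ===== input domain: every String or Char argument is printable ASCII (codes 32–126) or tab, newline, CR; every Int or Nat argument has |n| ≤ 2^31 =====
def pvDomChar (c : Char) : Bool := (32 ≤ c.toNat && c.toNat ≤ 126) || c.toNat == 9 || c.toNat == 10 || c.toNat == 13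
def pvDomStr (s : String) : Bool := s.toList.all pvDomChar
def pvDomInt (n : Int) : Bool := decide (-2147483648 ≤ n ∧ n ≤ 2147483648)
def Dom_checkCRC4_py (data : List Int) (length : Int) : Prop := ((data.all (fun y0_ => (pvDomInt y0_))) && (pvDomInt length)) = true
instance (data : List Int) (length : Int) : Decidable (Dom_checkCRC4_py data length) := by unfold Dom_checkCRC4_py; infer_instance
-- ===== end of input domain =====

-- B replaces A's table-driven nibble pass by a staged computation: it flattens the
-- message into an explicit bit list and long-divides it bit-serially by x^4+x+1;
-- alternative formulation, same asymptotic cost.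

-- ===== PORT A =====
def pvTab : List Int := [0, 3, 6, 5, 12, 15, 10, 9, 11, 8, 13, 14, 7, 4, 1, 2]

def checkCRC4_py (data : List Int) (length : Int) : Bool :=
  let crc : Int := (PySem.List.pyRange 0 (length - 1) 1).foldl (fun crc i =>
      let b := PySem.List.pyGetD data i 0
      let crc := PySem.Int.bxor (PySem.List.pyGetD pvTab crc 0) (b >>> (4 : Nat))
      PySem.Int.bxor (PySem.List.pyGetD pvTab crc 0) (PySem.Int.band b 15)) 0
  let crc := PySem.Int.bxor (PySem.List.pyGetD pvTab crc 0)
      ((PySem.List.pyGetD data (-1) 0) >>> (4 : Nat))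
  let crc := PySem.List.pyGetD pvTab crc 0
  decide (crc = PySem.Int.band (PySem.List.pyGetD data (-1) 0) 15)

-- ===== PORT B =====
-- bits of a nibble / byte, MSB first ('(x >> k) & 1 for k in range(…, -1, -1)')
def pvNibBits (n : Int) : List Int :=
  (PySem.List.pyRange 3 (-1) (-1)).map (fun k => PySem.Int.band (n >>> k.toNat) 1)

def pvByteBits (b : Int) : List Int :=
  (PySem.List.pyRange 7 (-1) (-1)).map (fun k => PySem.Int.band (b >>> k.toNat) 1)

-- one step of the bit-serial long division by x^4 + x + 1 (0x13)
def pvBitStep (crc bit : Int) : Int :=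
  let c := PySem.Int.bor (crc <<< (1 : Nat)) bit
  if PySem.Int.band c 16 ≠ 0 then PySem.Int.bxor c 19 else c

def checkCRC4_py_alt (data : List Int) (length : Int) : Bool :=
  let bits : List Int := (PySem.List.pyRange 0 (length - 1) 1).foldl
      (fun acc i => acc ++ pvByteBits (PySem.Int.band (PySem.List.pyGetD data i 0) 255)) []
  let hi := (PySem.Int.band (PySem.List.pyGetD data (-1) 0) 255) >>> (4 : Nat)
  let bits := bits ++ pvNibBits hi
  let bits := bits ++ [0, 0, 0, 0]
  let crc := bits.foldl pvBitStep 0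
  decide (crc = PySem.Int.band (PySem.List.pyGetD data (-1) 0) 15)

-- ===== PRECONDITION & SPEC =====
-- Pre_ excludes exactly the inputs on which A raises IndexError: empty data,
-- length > len(data)+1, or an accessed element outside [-256, 255] (whose high
-- nibble then indexes the 16-entry table out of range).
def Pre_checkCRC4_py (data : List Int) (length : Int) : Prop :=
  data ≠ [] ∧ length ≤ (data.length : Int) + 1 ∧
  (∀ b ∈ data.take (length - 1).toNat, -256 ≤ b ∧ b ≤ 255) ∧
  (-256 ≤ data.getD (data.length - 1) 0 ∧ data.getD (data.length - 1) 0 ≤ 255)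
instance (data : List Int) (length : Int) : Decidable (Pre_checkCRC4_py data length) := by
  unfold Pre_checkCRC4_py; infer_instance

def pvWitness_checkCRC4_py : List Int × Int := ([18, 52, 7], 3)

def Spec_checkCRC4_py (data : List Int) (length : Int) (out : Bool) : Prop := out = checkCRC4_py_alt data length
instance (data : List Int) (length : Int) (out : Bool) : Decidable (Spec_checkCRC4_py data length out) := by unfold Spec_checkCRC4_py; infer_instance

-- ===== CLAIM (what is proved, stated in full; the proofs are below) =====
def Claim_equal_checkCRC4_py : Prop := ∀ (data : List Int) (length : Int), Dom_checkCRC4_py data length → Pre_checkCRC4_py data length → Spec_checkCRC4_py data length (checkCRC4_py data length)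


-- ===== LEMMAS AND PROOFS =====

lemma pvTabRange (c : Int) (h1 : 0 ≤ c) (h2 : c < 16) :
    0 ≤ PySem.List.pyGetD pvTab c 0 ∧ PySem.List.pyGetD pvTab c 0 < 16 := by
  interval_cases c <;> exact ⟨by decide, by decide⟩

lemma pvBxorNib (x n : Int) (hx1 : 0 ≤ x) (hx2 : x < 16) (hn1 : 0 ≤ n) (hn2 : n < 16) :
    0 ≤ PySem.Int.bxor x n ∧ PySem.Int.bxor x n < 16 := by
  interval_cases x <;> interval_cases n <;> exact ⟨by decide, by decide⟩

lemma pvBxorNeg (x h : Int) (hx1 : 0 ≤ x) (hx2 : x < 16) (hh1 : 0 ≤ h) (hh2 : h < 16) :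
    PySem.Int.bxor x (h - 16) = PySem.Int.bxor x h - 16 := by
  interval_cases x <;> interval_cases h <;> decide

lemma pvTabWrap (x : Int) (h1 : 0 ≤ x) (h2 : x < 16) :
    PySem.List.pyGetD pvTab (x - 16) 0 = PySem.List.pyGetD pvTab x 0 := by
  interval_cases x <;> decide

lemma pvNibFold (c n : Int) (hc1 : 0 ≤ c) (hc2 : c < 16) (hn1 : 0 ≤ n) (hn2 : n < 16) :
    (pvNibBits n).foldl pvBitStep c = PySem.Int.bxor (PySem.List.pyGetD pvTab c 0) n := by
  interval_cases c <;> interval_cases n <;> decide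

lemma pvMask (b : Int) (h1 : -256 ≤ b) (h2 : b ≤ 255) :
    PySem.Int.band b 255 = (if b < 0 then b + 256 else b) ∧
    PySem.Int.band b 15 = PySem.Int.band (PySem.Int.band b 255) 15 ∧
    b >>> (4 : Nat) = (PySem.Int.band b 255) >>> (4 : Nat) - (if b < 0 then 16 else 0) := by
  interval_cases b <;> exact ⟨by decide, by decide, by decide⟩

lemma pvSplit (v : Int) (h1 : 0 ≤ v) (h2 : v < 256) :
    pvByteBits v = pvNibBits (v >>> (4 : Nat)) ++ pvNibBits (PySem.Int.band v 15) ∧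
    0 ≤ v >>> (4 : Nat) ∧ v >>> (4 : Nat) < 16 ∧
    0 ≤ PySem.Int.band v 15 ∧ PySem.Int.band v 15 < 16 := by
  interval_cases v <;> exact ⟨by decide, by decide, by decide, by decide, by decide⟩

-- A's per-byte step (the two table lines of A's loop body)
def pvStepA (c b : Int) : Int :=
  PySem.Int.bxor
    (PySem.List.pyGetD pvTab
      (PySem.Int.bxor (PySem.List.pyGetD pvTab c 0) (b >>> (4 : Nat))) 0)
    (PySem.Int.band b 15)

-- A's table step on the high nibble equals B's masked one (negative bytes wrap)
lemma pvHiLem (c b : Int) (hc1 : 0 ≤ c) (hc2 : c < 16) (hb1 : -256 ≤ b) (hb2 : b ≤ 255) :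
    PySem.List.pyGetD pvTab (PySem.Int.bxor (PySem.List.pyGetD pvTab c 0) (b >>> (4 : Nat))) 0
      = PySem.List.pyGetD pvTab
          (PySem.Int.bxor (PySem.List.pyGetD pvTab c 0)
            ((PySem.Int.band b 255) >>> (4 : Nat))) 0 := by
  obtain ⟨hm255, -, hshift⟩ := pvMask b hb1 hb2
  obtain ⟨ht1, ht2⟩ := pvTabRange c hc1 hc2
  have hv1 : 0 ≤ PySem.Int.band b 255 := by rw [hm255]; split_ifs <;> omega
  have hv2 : PySem.Int.band b 255 < 256 := by rw [hm255]; split_ifs <;> omega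
  obtain ⟨-, hh1, hh2, -, -⟩ := pvSplit _ hv1 hv2
  by_cases hneg : b < 0
  · rw [hshift]; simp only [hneg, if_pos]
    rw [show (PySem.Int.band b 255) >>> (4:Nat) - 16 = ((PySem.Int.band b 255) >>> (4:Nat)) - 16 from rfl,
      pvBxorNeg _ _ ht1 ht2 hh1 hh2]
    exact pvTabWrap _ (pvBxorNib _ _ ht1 ht2 hh1 hh2).1 (pvBxorNib _ _ ht1 ht2 hh1 hh2).2
  · rw [hshift]; simp [hneg]
  
-- one masked byte's bits advance B's shift register exactly as A's two table lines do
lemma pvByteLem (c b : Int) (hc1 : 0 ≤ c) (hc2 : c < 16) (hb1 : -256 ≤ b) (hb2 : b ≤ 255) :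
    (pvByteBits (PySem.Int.band b 255)).foldl pvBitStep c = pvStepA c b ∧
    0 ≤ pvStepA c b ∧ pvStepA c b < 16 := by
  obtain ⟨hm255, hm15, -⟩ := pvMask b hb1 hb2
  have hv1 : 0 ≤ PySem.Int.band b 255 := by rw [hm255]; split_ifs <;> omega
  have hv2 : PySem.Int.band b 255 < 256 := by rw [hm255]; split_ifs <;> omega
  obtain ⟨hsplit, hh1, hh2, hl1, hl2⟩ := pvSplit _ hv1 hv2
  obtain ⟨ht1, ht2⟩ := pvTabRange c hc1 hc2
  obtain ⟨hx1, hx2⟩ := pvBxorNib _ _ ht1 ht2 hh1 hh2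
  obtain ⟨ht1', ht2'⟩ := pvTabRange _ hx1 hx2
  have hfold : (pvByteBits (PySem.Int.band b 255)).foldl pvBitStep c
      = PySem.Int.bxor
          (PySem.List.pyGetD pvTab
            (PySem.Int.bxor (PySem.List.pyGetD pvTab c 0)
              ((PySem.Int.band b 255) >>> (4 : Nat))) 0)
          (PySem.Int.band (PySem.Int.band b 255) 15) := by
    rw [hsplit, List.foldl_append, pvNibFold c _ hc1 hc2 hh1 hh2,
      pvNibFold _ _ hx1 hx2 hl1 hl2]
  have hstep : pvStepA c b
      = PySem.Int.bxor
          (PySem.List.pyGetD pvTab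
            (PySem.Int.bxor (PySem.List.pyGetD pvTab c 0)
              ((PySem.Int.band b 255) >>> (4 : Nat))) 0)
          (PySem.Int.band (PySem.Int.band b 255) 15) := by
    unfold pvStepA
    rw [pvHiLem c b hc1 hc2 hb1 hb2, hm15]
  refine ⟨by rw [hfold, hstep], ?_, ?_⟩
  · rw [hstep]; exact (pvBxorNib _ _ ht1' ht2' hl1 hl2).1
  · rw [hstep]; exact (pvBxorNib _ _ ht1' ht2' hl1 hl2).2

-- the whole prefix: B's flattened bit list vs A's foldl with the two table lines
lemma pvFoldFlat (data : List Int) (l : List Int) (c : Int)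
    (hc1 : 0 ≤ c) (hc2 : c < 16)
    (hl : ∀ i ∈ l, -256 ≤ PySem.List.pyGetD data i 0 ∧ PySem.List.pyGetD data i 0 ≤ 255) :
    ((l.flatMap (fun i => pvByteBits (PySem.Int.band (PySem.List.pyGetD data i 0) 255))).foldl
        pvBitStep c
      = l.foldl (fun crc i =>
          let b := PySem.List.pyGetD data i 0
          let crc := PySem.Int.bxor (PySem.List.pyGetD pvTab crc 0) (b >>> (4 : Nat))
          PySem.Int.bxor (PySem.List.pyGetD pvTab crc 0) (PySem.Int.band b 15)) c) ∧
    0 ≤ l.foldl (fun crc i =>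
          let b := PySem.List.pyGetD data i 0
          let crc := PySem.Int.bxor (PySem.List.pyGetD pvTab crc 0) (b >>> (4 : Nat))
          PySem.Int.bxor (PySem.List.pyGetD pvTab crc 0) (PySem.Int.band b 15)) c ∧
    l.foldl (fun crc i =>
          let b := PySem.List.pyGetD data i 0
          let crc := PySem.Int.bxor (PySem.List.pyGetD pvTab crc 0) (b >>> (4 : Nat))
          PySem.Int.bxor (PySem.List.pyGetD pvTab crc 0) (PySem.Int.band b 15)) c < 16 := by
  induction l generalizing c with
  | nil => exact ⟨rfl, hc1, hc2⟩
  | cons x xs ih =>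
    obtain ⟨hb1, hb2⟩ := hl x List.mem_cons_self
    obtain ⟨he, h0, h15⟩ := pvByteLem c (PySem.List.pyGetD data x 0) hc1 hc2 hb1 hb2
    simp only [List.flatMap_cons, List.foldl_cons, List.foldl_append]
    obtain ⟨ihe, ih0, ih15⟩ := ih _ h0 h15 (fun i hi => hl i (List.mem_cons_of_mem _ hi))
    rw [he]
    exact ⟨ihe, ih0, ih15⟩

-- ===== VERDICT (by name: the statement is the Claim_ definition above) =====
theorem checkCRC4_py_spec : Claim_equal_checkCRC4_py := by
  intro data length hDom hPre
  obtain ⟨hne, hlen, hpref, hlast1, hlast2⟩ := hPre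
  have hlenpos : 0 < data.length := List.length_pos_iff.mpr hne
  have hgetD : data.getD (data.length - 1) 0 = data.getLast hne := by
    rw [List.getLast_eq_getElem, List.getD_eq_getElem data 0 (by omega)]
  rw [hgetD] at hlast1 hlast2
  have hneg : PySem.List.pyGetD data (-1) 0 = data.getLast hne := PySem.List.pyGetD_neg_one data 0 hne
  have hl : ∀ i ∈ PySem.List.pyRange 0 (length - 1) 1,
      -256 ≤ PySem.List.pyGetD data i 0 ∧ PySem.List.pyGetD data i 0 ≤ 255 := by
    intro i hi
    rw [PySem.List.mem_pyRange_one] at hi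
    obtain ⟨h0i, hil⟩ := hi
    have hilen : i < (data.length : Int) := by omega
    rw [PySem.List.pyGetD_eq_getElem data 0 h0i hilen]
    have htk : i.toNat < (length - 1).toNat := by omega
    have hmem : data[i.toNat] ∈ data.take (length - 1).toNat := by
      have := List.getElem_take (xs := data) (j := (length - 1).toNat) (i := i.toNat)
        (h := by rw [List.length_take]; omega)
      exact this ▸ List.getElem_mem _
    exact hpref _ hmem
  obtain ⟨hfe, hf0, hf15⟩ := pvFoldFlat data (PySem.List.pyRange 0 (length - 1) 1) 0
    (by omega) (by omega) hl
  unfold Spec_checkCRC4_py checkCRC4_py checkCRC4_py_alt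
  simp only [hneg]
  rw [PySem.List.foldl_append_eq_flatMap]
  simp only [List.nil_append, List.foldl_append]
  rw [← hfe] at hf0 hf15
  -- tail: the last byte's high nibble, then four zero bits
  obtain ⟨hm255, -, -⟩ := pvMask (data.getLast hne) hlast1 hlast2
  have hv1 : 0 ≤ PySem.Int.band (data.getLast hne) 255 := by rw [hm255]; split_ifs <;> omega
  have hv2 : PySem.Int.band (data.getLast hne) 255 < 256 := by rw [hm255]; split_ifs <;> omega
  obtain ⟨-, hh1, hh2, -, -⟩ := pvSplit _ hv1 hv2
  rw [← hfe, pvNibFold _ _ hf0 hf15 hh1 hh2]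
  obtain ⟨hx1, hx2⟩ := pvBxorNib _ _ (pvTabRange _ hf0 hf15).1 (pvTabRange _ hf0 hf15).2 hh1 hh2
  have hzeros : ([0, 0, 0, 0] : List Int) = pvNibBits 0 := by decide
  rw [hzeros, pvNibFold _ _ hx1 hx2 (by omega) (by omega)]
  rw [pvHiLem _ _ hf0 hf15 hlast1 hlast2]
  simp
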